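-- pv_equiv track=rewrite | github.com/promptdriven/pdd | experiments/grounding/results/llm_invoke_pro_generations/llm_invoke_grounded_run3.py | _is_malformed_json_response
-- ===== SOURCE A (Python) =====
-- def _is_malformed_json_response(content: str) -> bool:
--     """Detect JSON truncated by excessive newlines (common in some models)."""
--     if not content or not isinstance(content, str):
--         return False
--     stripped = content.strip()
--     if not stripped.startswith('{') and not stripped.startswith('['):
--         return False
--     if stripped.endswith('}') or stripped.endswith(']'):
--         return False
--
--     # Check for excessive trailing escaped newlines
--     trailing_newlines = 0
--     temp = stripped
--     while temp.endswith('\\n'):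
--         trailing_newlines += 1
--         temp = temp[:-2]
--
--     return trailing_newlines > 50 or stripped.endswith('\\')
-- ===== SOURCE B (Python) =====
-- def _is_malformed_json_response(content: str) -> bool:
--     """Detect JSON truncated by excessive newlines (common in some models)."""
--     if not content or not isinstance(content, str):
--         return False
--     stripped = content.strip()
--     if not (stripped.startswith('{') or stripped.startswith('[')):
--         return False
--     if stripped.endswith('}') or stripped.endswith(']'):
--         return False
--     # more than 50 trailing "\n" pairs  <=>  the string ends with 51 of them
--     return stripped.endswith('\\n' * 51) or stripped.endswith('\\')
-- ===== Notes on version B (the rewrite author's own statement) =====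
-- stated objective: simpler
-- what changed: Replaced the while-loop that repeatedly strips and counts trailing backslash-n escape pairs by a single suffix test: the count exceeds 50 exactly when the stripped string ends with 51 such pairs.
import Mathlib
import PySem

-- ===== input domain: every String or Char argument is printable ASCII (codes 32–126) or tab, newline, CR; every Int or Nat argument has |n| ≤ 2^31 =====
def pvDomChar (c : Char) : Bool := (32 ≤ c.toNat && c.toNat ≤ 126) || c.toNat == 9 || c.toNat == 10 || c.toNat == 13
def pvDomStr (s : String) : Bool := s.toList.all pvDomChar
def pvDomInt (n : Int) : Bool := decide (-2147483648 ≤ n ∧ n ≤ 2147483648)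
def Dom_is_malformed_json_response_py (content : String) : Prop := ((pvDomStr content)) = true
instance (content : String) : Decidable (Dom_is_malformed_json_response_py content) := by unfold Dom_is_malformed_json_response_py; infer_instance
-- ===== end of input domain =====

-- B replaces A's pair-stripping while-loop by a single suffix check: more than 50 trailing
-- "\n" pairs iff the string ends with 51 of them (objective: simpler).


-- ===== PORT A =====
-- the two-char suffix '\n' (backslash, 'n')
def pvPair : List Char := ['\\', 'n']

-- A's while-loop: strip a trailing "\n" pair and count, until none remains
def pvCountA (temp : List Char) : Nat :=
  if h : PySem.Chars.endswith temp pvPair then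
    pvCountA (PySem.Chars.slice temp none (some (-2))) + 1
  else 0
termination_by temp.length
decreasing_by
  have h2 : 2 ≤ temp.length := by
    have hs := (PySem.Chars.endswith_iff temp pvPair).mp h
    simpa [pvPair] using hs.length_le
  simp only [PySem.Chars.slice_eq_listSlice]
  rw [PySem.List.slice_to_neg_ofNat temp 2 (by omega)]
  simp [List.length_take]; omega

def is_malformed_json_response_py (content : String) : Bool :=
  if content = "" then false
  else
    let stripped := (PySem.Str.strip content).toList
    if !PySem.Chars.startswith stripped ['{'] && !PySem.Chars.startswith stripped ['['] then false
    else if PySem.Chars.endswith stripped ['}'] || PySem.Chars.endswith stripped [']'] then false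
    else decide (50 < pvCountA stripped) || PySem.Chars.endswith stripped ['\\']

-- ===== PORT B =====
-- port of the Python string repetition '\\n' * k
def pvRep : Nat → List Char
  | 0 => []
  | k+1 => '\\' :: 'n' :: pvRep k

def is_malformed_json_response_py_alt (content : String) : Bool :=
  if content = "" then false
  else
    let stripped := (PySem.Str.strip content).toList
    if !(PySem.Chars.startswith stripped ['{'] || PySem.Chars.startswith stripped ['[']) then false
    else if PySem.Chars.endswith stripped ['}'] || PySem.Chars.endswith stripped [']'] then false
    else PySem.Chars.endswith stripped (pvRep 51) || PySem.Chars.endswith stripped ['\\']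

-- ===== PRECONDITION & SPEC =====
def Spec_is_malformed_json_response_py (content : String) (out : Bool) : Prop := out = is_malformed_json_response_py_alt content
instance (content : String) (out : Bool) : Decidable (Spec_is_malformed_json_response_py content out) := by unfold Spec_is_malformed_json_response_py; infer_instance

-- ===== CLAIM (what is proved, stated in full; the proofs are below) =====
def Claim_equal_is_malformed_json_response_py : Prop := ∀ (content : String), Dom_is_malformed_json_response_py content → Spec_is_malformed_json_response_py content (is_malformed_json_response_py content)

-- ===== LEMMAS AND PROOFS =====
theorem pvRep_succ (k : Nat) : pvRep (k+1) = pvRep k ++ pvPair := by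
  induction k with
  | zero => rfl
  | succ k ih => simp [pvRep, pvPair] at ih ⊢; exact ih

theorem pvCountA_ge_iff (k : Nat) : ∀ s : List Char, k ≤ pvCountA s ↔ pvRep k <:+ s := by
  induction k with
  | zero => intro s; simp [pvRep]
  | succ k ih =>
    intro s
    rw [pvCountA]
    by_cases h : PySem.Chars.endswith s pvPair = true
    · obtain ⟨u, hu⟩ := (PySem.Chars.endswith_iff s pvPair).mp h
      have hslice : PySem.Chars.slice s (none : Option Int) (some (-2)) = u := by
        simp only [PySem.Chars.slice_eq_listSlice]
        rw [PySem.List.slice_to_neg_ofNat s 2 (by omega)]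
        subst hu
        simp [pvPair]
      simp only [h, dif_pos, hslice]
      rw [Nat.succ_le_succ_iff, ih u, pvRep_succ]
      constructor
      · intro ⟨v, hv⟩; exact ⟨v, by rw [← hu, ← hv, List.append_assoc]⟩
      · intro ⟨v, hv⟩
        have : v ++ pvRep k ++ pvPair = u ++ pvPair := by rw [List.append_assoc, hv, hu]
        exact ⟨v, by have := List.append_cancel_right this; exact this⟩
    · simp only [dif_neg h]
      constructor
      · omega
      · intro hsuf
        exfalso; apply h
        rw [PySem.Chars.endswith_iff]
        exact (List.suffix_append _ _ |>.trans (pvRep_succ k ▸ hsuf))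
  
theorem pvCountA_gt50_iff (s : List Char) :
    decide (50 < pvCountA s) = PySem.Chars.endswith s (pvRep 51) := by
  rcases h : PySem.Chars.endswith s (pvRep 51) with _ | _
  · simp only [decide_eq_false_iff_not]
    intro hgt
    have := (pvCountA_ge_iff 51 s).mp (by omega)
    rw [← PySem.Chars.endswith_iff] at this
    simp [this] at h
  · simp only [decide_eq_true_iff]
    have := (pvCountA_ge_iff 51 s).mpr ((PySem.Chars.endswith_iff s (pvRep 51)).mp h)
    omega

-- ===== VERDICT (by name: the statement is the Claim_ definition above) =====
theorem is_malformed_json_response_py_spec : Claim_equal_is_malformed_json_response_py := by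
  intro content _
  unfold Spec_is_malformed_json_response_py is_malformed_json_response_py is_malformed_json_response_py_alt
  by_cases hc : content = ""
  · simp [hc]
  · simp only [hc, ite_false]
    set s := (PySem.Str.strip content).toList with hs
    by_cases h1 : (!PySem.Chars.startswith s ['{'] && !PySem.Chars.startswith s ['[']) = true
    · simp only [h1]
      have : (!(PySem.Chars.startswith s ['{'] || PySem.Chars.startswith s ['['])) = true := by
        simp_all
      simp [this]
    · have : (!(PySem.Chars.startswith s ['{'] || PySem.Chars.startswith s ['['])) = false := by
        simp_all
      simp only [h1, this, if_false, Bool.false_eq_true]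
      split
      · rfl
      · rw [pvCountA_gt50_iff]
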